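-- pv_equiv track=rewrite | github.com/mostafa-netizen/Sadidul-Islam-Analysis | ocr/post_tension_tendons.py | remove_similar_lines
-- ===== SOURCE A (Python) =====
-- def remove_similar_lines(lines, y_thresh=10):
--     """
--     Remove similar horizontal lines.
--     Keeps the longest line among those close vertically.
--     """
--
--     # sort by y coordinate
--     lines = sorted(lines, key=lambda x: x[1])
--
--     filtered = []
--     used = [False] * len(lines)
--
--     for i, l1 in enumerate(lines):
--         if used[i]:
--             continue
--
--         group = [i]
--         y1 = l1[1]
--
--         # group close lines
--         for j in range(i + 1, len(lines)):
--             if used[j]: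
--                 continue
--
--             y2 = lines[j][1]
--
--             if abs(y1 - y2) <= y_thresh:
--                 group.append(j)
--                 used[j] = True
--             else:
--                 break
--
--         # pick the longest line in this group
--         best_idx = max(
--             group,
--             key=lambda idx: abs(lines[idx][2] - lines[idx][0])
--         )
--
--         filtered.append(lines[best_idx])
--
--     return filtered
-- ===== SOURCE B (Python) =====
-- def remove_similar_lines(lines, y_thresh=10):
--     """Single linear pass over the y-sorted lines: keep a group anchor y and the
--     current longest line; flush the best when a line falls outside the threshold."""
--     lines = sorted(lines, key=lambda x: x[1])
--     if not lines:
--         return []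
--     result = []
--     anchor = lines[0][1]
--     best = lines[0]
--     for ln in lines[1:]:
--         if ln[1] - anchor <= y_thresh:
--             if abs(ln[2] - ln[0]) > abs(best[2] - best[0]):
--                 best = ln
--         else:
--             result.append(best)
--             anchor = ln[1]
--             best = ln
--     result.append(best)
--     return result
-- ===== Notes on version B (the rewrite author's own statement) =====
-- stated objective: simpler
-- what changed: A's used-boolean array, index bookkeeping and per-group inner rescan plus a max() over collected indices are replaced by a single linear pass over the y-sorted lines that keeps only the current group's anchor y and its longest line so far.
import Mathlib
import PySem

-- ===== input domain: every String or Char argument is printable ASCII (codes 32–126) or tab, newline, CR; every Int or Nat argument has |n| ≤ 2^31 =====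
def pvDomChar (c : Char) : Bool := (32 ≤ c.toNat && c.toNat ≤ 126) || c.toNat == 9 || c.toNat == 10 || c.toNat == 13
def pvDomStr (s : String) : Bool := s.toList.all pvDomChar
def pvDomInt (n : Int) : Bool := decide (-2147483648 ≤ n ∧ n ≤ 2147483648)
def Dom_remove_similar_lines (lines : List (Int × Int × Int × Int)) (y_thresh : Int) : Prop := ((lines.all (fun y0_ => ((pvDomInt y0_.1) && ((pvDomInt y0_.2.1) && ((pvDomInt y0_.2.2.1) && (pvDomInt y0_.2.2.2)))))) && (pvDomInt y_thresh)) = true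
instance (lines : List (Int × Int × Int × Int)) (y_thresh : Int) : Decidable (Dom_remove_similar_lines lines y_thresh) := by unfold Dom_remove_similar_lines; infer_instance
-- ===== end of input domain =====

-- B replaces A's used-array bookkeeping and inner grouping scan by one linear pass
-- over the y-sorted lines keeping the current group's anchor y and longest line (objective: simpler).

-- ===== PORT A =====

-- inner loop: `for j in range(i+1, len(lines)): … else: break`, threading `used` and `group`
def pvInnerA (s : List (Int × Int × Int × Int)) (y_thresh y1 : Int) (n j : Nat)
    (used : List Bool) (group : List Nat) : List Bool × List Nat :=
  if j < n then
    if used.getD j false then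
      pvInnerA s y_thresh y1 n (j + 1) used group          -- continue
    else
      let y2 := (s.getD j (0, 0, 0, 0)).2.1
      if |y1 - y2| ≤ y_thresh then
        pvInnerA s y_thresh y1 n (j + 1) (used.set j true) (group ++ [j])
      else
        (used, group)                                       -- break
  else
    (used, group)
termination_by n - j

-- outer loop: `for i, l1 in enumerate(lines)`, threading `used` and `filtered`
def pvOuterA (s : List (Int × Int × Int × Int)) (y_thresh : Int) (n i : Nat)
    (used : List Bool) (filtered : List (Int × Int × Int × Int)) : List (Int × Int × Int × Int) :=
  if i < n then
    if used.getD i false then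
      pvOuterA s y_thresh n (i + 1) used filtered          -- continue
    else
      let l1 := s.getD i (0, 0, 0, 0)
      let y1 := l1.2.1
      let r := pvInnerA s y_thresh y1 n (i + 1) used [i]
      -- Python's max(group, key=…); group is never empty (it contains i), so the
      -- `.getD 0` default of the Option is never the returned branch on Python's runs
      let best_idx := (PySem.List.max? r.2
        (fun idx => |(s.getD idx (0, 0, 0, 0)).2.2.1 - (s.getD idx (0, 0, 0, 0)).1|)).getD 0
      pvOuterA s y_thresh n (i + 1) r.1 (filtered ++ [s.getD best_idx (0, 0, 0, 0)])
  else
    filtered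
termination_by n - i

def remove_similar_lines (lines : List (Int × Int × Int × Int)) (y_thresh : Int) :
    List (Int × Int × Int × Int) :=
  let s := PySem.List.sorted lines (fun x => x.2.1)
  pvOuterA s y_thresh s.length 0 (List.replicate s.length false) []

-- ===== PORT B =====

-- the `for ln in lines[1:]` loop of Source B, state = (anchor, best, result)
def pvGoB (y_thresh : Int) (rest : List (Int × Int × Int × Int)) (anchor : Int)
    (best : Int × Int × Int × Int) (result : List (Int × Int × Int × Int)) :
    List (Int × Int × Int × Int) :=
  match rest with
  | [] => result ++ [best]
  | ln :: rs =>
    if ln.2.1 - anchor ≤ y_thresh then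
      pvGoB y_thresh rs anchor
        (if |best.2.2.1 - best.1| < |ln.2.2.1 - ln.1| then ln else best) result
    else
      pvGoB y_thresh rs ln.2.1 ln (result ++ [best])

def remove_similar_lines_alt (lines : List (Int × Int × Int × Int)) (y_thresh : Int) :
    List (Int × Int × Int × Int) :=
  match PySem.List.sorted lines (fun x => x.2.1) with
  | [] => []
  | l :: rest => pvGoB y_thresh rest l.2.1 l []

-- ===== PRECONDITION & SPEC =====
def Spec_remove_similar_lines (lines : List (Int × Int × Int × Int)) (y_thresh : Int) (out : List (Int × Int × Int × Int)) : Prop := out = remove_similar_lines_alt lines y_thresh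
instance (lines : List (Int × Int × Int × Int)) (y_thresh : Int) (out : List (Int × Int × Int × Int)) : Decidable (Spec_remove_similar_lines lines y_thresh out) := by unfold Spec_remove_similar_lines; infer_instance

-- ===== CLAIM (what is proved, stated in full; the proofs are below) =====
def Claim_equal_remove_similar_lines : Prop := ∀ (lines : List (Int × Int × Int × Int)) (y_thresh : Int), Dom_remove_similar_lines lines y_thresh → Spec_remove_similar_lines lines y_thresh (remove_similar_lines lines y_thresh)

-- ===== LEMMAS AND PROOFS =====

-- the common grouping specification both ports are reduced to: first-of-group anchor,
-- takeWhile-span, running first-maximal best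
def pvBetter (b x : Int × Int × Int × Int) : Int × Int × Int × Int :=
  if |b.2.2.1 - b.1| < |x.2.2.1 - x.1| then x else b

def pvGrp (y_thresh : Int) : List (Int × Int × Int × Int) → List (Int × Int × Int × Int)
  | [] => []
  | l :: rest =>
    (rest.takeWhile (fun x => decide (x.2.1 - l.2.1 ≤ y_thresh))).foldl pvBetter l ::
      pvGrp y_thresh (rest.dropWhile (fun x => decide (x.2.1 - l.2.1 ≤ y_thresh)))
termination_by xs => xs.length
decreasing_by
  simpa using Nat.lt_succ_of_le (List.length_dropWhile_le _ _)

lemma pvTakeWhile_congr {α : Type} (p q : α → Bool) (l : List α)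
    (h : ∀ x ∈ l, p x = q x) : l.takeWhile p = l.takeWhile q := by
  induction l with
  | nil => rfl
  | cons a t ih =>
    simp only [List.takeWhile_cons, h a (by simp)]
    cases q a <;> simp [ih (fun x hx => h x (by simp [hx]))]

lemma pvDropWhile_eq_drop {α : Type} (p : α → Bool) (l : List α) :
    l.dropWhile p = l.drop (l.takeWhile p).length := by
  have h := List.takeWhile_append_dropWhile (p := p) (l := l)
  calc l.dropWhile p
      = ((l.takeWhile p ++ l.dropWhile p).drop (l.takeWhile p).length) := by
        rw [List.drop_left]
    _ = l.drop (l.takeWhile p).length := by rw [h]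

-- B's loop equals the grouping spec
lemma pvGoB_eq (y_thresh : Int) (rest : List (Int × Int × Int × Int)) (anchor : Int)
    (best : Int × Int × Int × Int) (result : List (Int × Int × Int × Int)) :
    pvGoB y_thresh rest anchor best result =
      result ++
        ((rest.takeWhile (fun x => decide (x.2.1 - anchor ≤ y_thresh))).foldl pvBetter best ::
          pvGrp y_thresh (rest.dropWhile (fun x => decide (x.2.1 - anchor ≤ y_thresh)))) := by
  induction rest generalizing anchor best result with
  | nil => simp [pvGoB, pvGrp]
  | cons ln rs ih =>
    by_cases h : ln.2.1 - anchor ≤ y_thresh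
    · have h' : ln.2.1 ≤ y_thresh + anchor := by omega
      simp [pvGoB, h, h', ih, pvBetter]
    · have h' : ¬ ln.2.1 ≤ y_thresh + anchor := by omega
      rw [pvGoB, if_neg h, ih]
      simp [h', pvGrp]

lemma pvAlt_eq_grp (lines : List (Int × Int × Int × Int)) (y_thresh : Int) :
    remove_similar_lines_alt lines y_thresh =
      pvGrp y_thresh (PySem.List.sorted lines (fun x => x.2.1)) := by
  unfold remove_similar_lines_alt
  cases h : PySem.List.sorted lines (fun x => x.2.1) with
  | nil => simp [pvGrp]
  | cons l rest =>
    show pvGoB y_thresh rest l.2.1 l [] = _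
    rw [pvGoB_eq]
    simp [pvGrp]

-- Python's max(g, key) as a running first-maximal fold
lemma pvMax?_cons {α κ : Type} [LinearOrder κ] (x : α) (g : List α) (key : α → κ) :
    PySem.List.max? (x :: g) key =
      some (g.foldl (fun b v => if key b < key v then v else b) x) := by
  show List.foldl _ (some x) g = _
  induction g generalizing x with
  | nil => rfl
  | cons a t ih => simp only [List.foldl_cons]; split <;> rw [ih]

-- the inner loop on an all-unused suffix: group gains the consecutive takeWhile span,
-- used becomes true exactly on that span (and is untouched below j)
lemma pvInnerA_spec (s : List (Int × Int × Int × Int)) (y_thresh y1 : Int) :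
    ∀ j (used : List Bool) (group : List Nat),
      used.length = s.length →
      (∀ k, j ≤ k → used.getD k false = false) →
      (pvInnerA s y_thresh y1 s.length j used group).2 =
          group ++ (List.range ((s.drop j).takeWhile
            (fun x => decide (|y1 - x.2.1| ≤ y_thresh))).length).map (fun r => j + r) ∧
      (∀ k, j ≤ k → (pvInnerA s y_thresh y1 s.length j used group).1.getD k false =
          decide (k < j + ((s.drop j).takeWhile
            (fun x => decide (|y1 - x.2.1| ≤ y_thresh))).length)) ∧
      (pvInnerA s y_thresh y1 s.length j used group).1.length = s.length ∧
      (∀ k, k < j → (pvInnerA s y_thresh y1 s.length j used group).1.getD k false =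
          used.getD k false) := by
  have H : ∀ d j (used : List Bool) (group : List Nat), s.length - j = d →
      used.length = s.length →
      (∀ k, j ≤ k → used.getD k false = false) →
      (pvInnerA s y_thresh y1 s.length j used group).2 =
          group ++ (List.range ((s.drop j).takeWhile
            (fun x => decide (|y1 - x.2.1| ≤ y_thresh))).length).map (fun r => j + r) ∧
      (∀ k, j ≤ k → (pvInnerA s y_thresh y1 s.length j used group).1.getD k false =
          decide (k < j + ((s.drop j).takeWhile
            (fun x => decide (|y1 - x.2.1| ≤ y_thresh))).length)) ∧
      (pvInnerA s y_thresh y1 s.length j used group).1.length = s.length ∧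
      (∀ k, k < j → (pvInnerA s y_thresh y1 s.length j used group).1.getD k false =
          used.getD k false) := by
    intro d
    induction d using Nat.strong_induction_on with
    | _ d ih =>
      intro j used group hd hlen hun
      by_cases hj : j < s.length
      · have hdrop : s.drop j = s[j] :: s.drop (j + 1) := List.drop_eq_getElem_cons hj
        have hgd : s.getD j (0, 0, 0, 0) = s[j] := by
          rw [List.getD_eq_getElem?_getD, List.getElem?_eq_getElem hj]; rfl
        rw [pvInnerA, if_pos hj, hun j (le_refl j)]
        simp only [Bool.false_eq_true, if_false, hgd]
        by_cases hc : |y1 - s[j].2.1| ≤ y_thresh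
        · -- grouped: mark j used, continue at j+1
          rw [if_pos hc]
          have hset_len : (used.set j true).length = s.length := by
            rw [List.length_set]; exact hlen
          have hset_un : ∀ k, j + 1 ≤ k → (used.set j true).getD k false = false := by
            intro k hk
            rw [List.getD_eq_getElem?_getD, List.getElem?_set_ne (by omega),
              ← List.getD_eq_getElem?_getD]
            exact hun k (by omega)
          obtain ⟨h1, h2, h3, h4⟩ := ih (s.length - (j + 1)) (by omega) (j + 1)
            (used.set j true) (group ++ [j]) rfl hset_len hset_un
          have htw : (s.drop j).takeWhile (fun x => decide (|y1 - x.2.1| ≤ y_thresh)) =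
              s[j] :: (s.drop (j + 1)).takeWhile (fun x => decide (|y1 - x.2.1| ≤ y_thresh)) := by
            rw [hdrop, List.takeWhile_cons, if_pos (by simpa using hc)]
          refine ⟨?_, ?_, h3, ?_⟩
          · rw [h1, htw]
            simp only [List.length_cons, List.range_succ_eq_map, List.map_cons,
              List.map_map, List.append_assoc, List.singleton_append, Nat.add_zero]
            congr 1
            congr 1
            exact List.map_congr_left (fun r _ => by simp [Function.comp]; omega)
          · intro k hk
            rw [htw]
            rcases Nat.eq_or_lt_of_le hk with rfl | hlt
            · rw [h4 j (by omega), List.getD_eq_getElem?_getD,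
                List.getElem?_set_self (by omega)]
              simp
            · rw [h2 k (by omega)]
              have : (k < j + 1 + ((s.drop (j + 1)).takeWhile
                  (fun x => decide (|y1 - x.2.1| ≤ y_thresh))).length) ↔
                  (k < j + (s[j] :: (s.drop (j + 1)).takeWhile
                  (fun x => decide (|y1 - x.2.1| ≤ y_thresh))).length) := by
                simp only [List.length_cons]; omega
              simp only [decide_eq_decide]; exact this
          · intro k hk
            rw [h4 k (by omega), List.getD_eq_getElem?_getD,
              List.getElem?_set_ne (by omega), ← List.getD_eq_getElem?_getD]
        · -- break
          rw [if_neg hc]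
          have htw : (s.drop j).takeWhile (fun x => decide (|y1 - x.2.1| ≤ y_thresh)) = [] := by
            rw [hdrop, List.takeWhile_cons, if_neg (by simpa using hc)]
          refine ⟨by simp [htw], ?_, hlen, fun _ _ => rfl⟩
          intro k hk
          rw [htw, hun k hk]
          simp; omega
      · have hdrop : s.drop j = [] := List.drop_eq_nil_of_le (by omega)
        rw [pvInnerA, if_neg hj]
        refine ⟨by simp [hdrop], ?_, hlen, fun _ _ => rfl⟩
        intro k hk
        rw [hdrop, hun k hk]
        simp; omega
  intro j used group hlen hun
  exact H (s.length - j) j used group rfl hlen hun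

-- folding the comparator over indices equals folding it over the looked-up lines
lemma pvFoldIdx (f : Nat → Int × Int × Int × Int) (idxs : List Nat) (x : Nat) :
    f (idxs.foldl (fun b v =>
        if |(f b).2.2.1 - (f b).1| < |(f v).2.2.1 - (f v).1| then v else b) x) =
      (idxs.map f).foldl pvBetter (f x) := by
  induction idxs generalizing x with
  | nil => rfl
  | cons a t ihx =>
    simp only [List.foldl_cons, List.map_cons, pvBetter]
    split <;> simp_all

-- the outer loop: used true exactly on [i, b) ⇒ result = acc ++ groups of s.drop b
lemma pvOuterA_spec (s : List (Int × Int × Int × Int)) (y_thresh : Int)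
    (hs : s.Pairwise (fun a b => a.2.1 ≤ b.2.1)) :
    ∀ i b (used : List Bool) (acc : List (Int × Int × Int × Int)),
      i ≤ b →
      used.length = s.length →
      (∀ k, i ≤ k → used.getD k false = decide (k < b)) →
      pvOuterA s y_thresh s.length i used acc = acc ++ pvGrp y_thresh (s.drop b) := by
  have H : ∀ d i b (used : List Bool) (acc : List (Int × Int × Int × Int)),
      s.length - i = d → i ≤ b → used.length = s.length →
      (∀ k, i ≤ k → used.getD k false = decide (k < b)) →
      pvOuterA s y_thresh s.length i used acc = acc ++ pvGrp y_thresh (s.drop b) := by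
    intro d
    induction d using Nat.strong_induction_on with
    | _ d ih =>
      intro i b used acc hd hib hlen hinv
      by_cases hi : i < s.length
      · by_cases hskip : i < b
        · -- used[i] is true: continue
          rw [pvOuterA, if_pos hi, hinv i (le_refl i), if_pos (by simpa using hskip)]
          exact ih (s.length - (i + 1)) (by omega) (i + 1) b used acc rfl (by omega) hlen
            (fun k hk => hinv k (by omega))
        · -- i = b: an unused line starts a new group
          have hbi : i = b := by omega
          subst hbi
          have hgd : s.getD i (0, 0, 0, 0) = s[i] := by
            rw [List.getD_eq_getElem?_getD, List.getElem?_eq_getElem hi]; rfl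
          have hused : used.getD i false = false := by
            rw [hinv i (le_refl i)]; simp
          obtain ⟨h1, h2, h3, h4⟩ := pvInnerA_spec s y_thresh (s[i].2.1) (i + 1) used [i] hlen
            (fun k hk => by rw [hinv k (by omega)]; simp; omega)
          -- the takeWhile span of the group
          set t := (s.drop (i + 1)).takeWhile
            (fun x => decide (|s[i].2.1 - x.2.1| ≤ y_thresh)) with ht
          have hm_le : t.length ≤ s.length - (i + 1) := by
            have := (List.takeWhile_prefix (l := s.drop (i + 1))
              (fun x => decide (|s[i].2.1 - x.2.1| ≤ y_thresh))).length_le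
            simpa [ht] using this
          -- elements of the drop are y-above s[i]
          have hmono : ∀ x ∈ s.drop (i + 1), s[i].2.1 ≤ x.2.1 := by
            intro x hx
            obtain ⟨r, hr, hxe⟩ := List.mem_iff_getElem.mp hx
            have hrn : i + 1 + r < s.length := by
              have := hr; simp [List.length_drop] at this; omega
            have : x = s[i + 1 + r] := by rw [← hxe, List.getElem_drop]
            subst this
            exact List.pairwise_iff_getElem.mp hs i (i + 1 + r) hi hrn (by omega)
          -- the two takeWhile predicates agree on the drop
          have hPQ : t = (s.drop (i + 1)).takeWhile
              (fun x => decide (x.2.1 - s[i].2.1 ≤ y_thresh)) := by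
            refine pvTakeWhile_congr _ _ _ (fun x hx => ?_)
            have h0 : s[i].2.1 ≤ x.2.1 := hmono x hx
            simp only [decide_eq_decide]
            rw [abs_sub_comm, abs_of_nonneg (by omega)]
          have hdw : (s.drop (i + 1)).dropWhile
              (fun x => decide (x.2.1 - s[i].2.1 ≤ y_thresh)) = s.drop (i + 1 + t.length) := by
            rw [pvDropWhile_eq_drop, ← hPQ, List.drop_drop]
          -- the group indices map to the span elements
          have hmapf : ((List.range t.length).map (fun r => i + 1 + r)).map
              (fun idx => s.getD idx (0, 0, 0, 0)) = t := by
            apply List.ext_getElem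
            · simp
            · intro r hr1 hr2
              have hrm : r < t.length := by simpa using hr1
              have hrn : i + 1 + r < s.length := by omega
              simp only [List.getElem_map, List.getElem_range]
              rw [List.getD_eq_getElem?_getD, List.getElem?_eq_getElem hrn]
              have htr : t[r] = (s.drop (i + 1))[r]'(by simp [List.length_drop]; omega) :=
                (List.takeWhile_prefix _).getElem hrm
              rw [htr]
              simp [List.getElem_drop]
          -- unfold one outer step
          rw [pvOuterA, if_pos hi, hused]
          simp only [Bool.false_eq_true, if_false, hgd, h1]
          rw [List.singleton_append, pvMax?_cons, Option.getD_some]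
          rw [pvFoldIdx (fun idx => s.getD idx (0, 0, 0, 0)), hmapf, hgd]
          -- apply the induction hypothesis past the group
          rw [ih (s.length - (i + 1)) (by omega) (i + 1) (i + 1 + t.length) _ _ rfl (by omega) h3
            (fun k hk => h2 k hk)]
          -- and fold one step of pvGrp on the right
          rw [List.drop_eq_getElem_cons hi]
          conv_rhs => rw [pvGrp]
          rw [← hPQ, hdw]
          simp
      · -- loop over: i \u2265 len, so b \u2265 len and both sides are acc
        rw [pvOuterA, if_neg hi]
        have hb : s.drop b = [] := List.drop_eq_nil_of_le (by omega)
        simp [hb, pvGrp]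
  intro i b used acc hib hlen hinv
  exact H (s.length - i) i b used acc rfl hib hlen hinv

-- ===== VERDICT (by name: the statement is the Claim_ definition above) =====
theorem remove_similar_lines_spec : Claim_equal_remove_similar_lines := by
  intro lines y_thresh _
  show _ = _
  rw [pvAlt_eq_grp]
  unfold remove_similar_lines
  have hs := PySem.List.sorted_pairwise (xs := lines) (key := fun x : Int × Int × Int × Int => x.2.1)
  have := pvOuterA_spec (PySem.List.sorted lines (fun x => x.2.1)) y_thresh hs 0 0
    (List.replicate (PySem.List.sorted lines (fun x => x.2.1)).length false) []
    (le_refl 0) (by simp)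
    (by intro k _
        rw [List.getD_eq_getElem?_getD, List.getElem?_replicate]
        split <;> simp)
  simpa using this
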